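-- pv_equiv track=rewrite | github.com/SafonovDanil/m2_nir | m2_nir.py | transform_to_cnf_1
-- ===== SOURCE A (Python) =====
-- def transform_to_cnf_1(arr):
--     var_map = {}
--     cnf_formula = []
--     var_counter = 1
--     for pair in arr:
--         if pair[0] not in var_map:
--             var_map[pair[0]] = var_counter
--             var_counter += 1
--         if pair[1] not in var_map:
--             var_map[pair[1]] = var_counter
--             var_counter += 1
--         cnf_pair = [-var_map[pair[0]], var_map[pair[1]]]
--         cnf_formula.append(cnf_pair)
--     return cnf_formula, var_map
-- ===== SOURCE B (Python) =====
-- def transform_to_cnf_1(arr):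
--     # collect every variable occurrence, dedupe in first-appearance order,
--     # number by position; no membership test or running counter needed
--     order = dict.fromkeys(v for pair in arr for v in (pair[0], pair[1]))
--     var_map = {v: i for i, v in enumerate(order, 1)}
--     return [[-var_map[p[0]], var_map[p[1]]] for p in arr], var_map
-- ===== Notes on version B (the rewrite author's own statement) =====
-- stated objective: idiomatic
-- what changed: Replaces A's single loop with a conditional insert and a running counter by a flatten -> ordered-dedup (dict.fromkeys) -> enumerate pipeline that numbers variables by position, then emits all clauses by a comprehension over the finished map.
import Mathlib
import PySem

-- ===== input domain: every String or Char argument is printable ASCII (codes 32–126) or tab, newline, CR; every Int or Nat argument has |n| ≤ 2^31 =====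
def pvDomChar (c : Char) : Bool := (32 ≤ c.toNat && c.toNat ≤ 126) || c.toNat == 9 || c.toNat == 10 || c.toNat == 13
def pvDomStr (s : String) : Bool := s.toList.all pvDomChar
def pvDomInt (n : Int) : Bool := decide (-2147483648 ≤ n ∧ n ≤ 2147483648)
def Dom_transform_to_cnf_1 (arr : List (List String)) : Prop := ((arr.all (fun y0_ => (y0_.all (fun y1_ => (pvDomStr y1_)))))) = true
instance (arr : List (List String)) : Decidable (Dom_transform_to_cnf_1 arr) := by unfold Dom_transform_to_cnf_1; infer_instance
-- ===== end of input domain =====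

-- B replaces A's conditional-insert/counter loop by a flatten → ordered-dedup →
-- enumerate pipeline that numbers variables by position (objective: idiomatic).

-- ===== PORT A =====
-- one loop: insert pair[0], then pair[1] if unseen (with a running counter), then emit the clause
def transform_to_cnf_1 (arr : List (List String)) : List (List Int) × (List (String × Int)) :=
  let st := arr.foldl (fun (st : PySem.Dict String Int × List (List Int) × Int) pair =>
      let p0 := (PySem.List.pyGet? pair 0).getD ""   -- pair[0]; Pre_ makes the index valid
      let p1 := (PySem.List.pyGet? pair 1).getD ""   -- pair[1]
      let d1 := if st.1.contains p0 then st.1 else st.1.insert p0 st.2.2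
      let c1 := if st.1.contains p0 then st.2.2 else st.2.2 + 1
      let d2 := if d1.contains p1 then d1 else d1.insert p1 c1
      let c2 := if d1.contains p1 then c1 else c1 + 1
      (d2, st.2.1 ++ [[-(d2.getD p0 0), d2.getD p1 0]], c2))
    (PySem.Dict.empty, ([], 1))
  (st.2.1, st.1.items)

-- ===== PORT B =====
-- order = dict.fromkeys(v for pair in arr for v in (pair[0], pair[1]))
-- var_map = {v: i for i, v in enumerate(order, 1)}
def transform_to_cnf_1_alt (arr : List (List String)) : List (List Int) × (List (String × Int)) :=
  let order := PySem.List.dedup (arr.flatMap (fun pair =>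
      [(PySem.List.pyGet? pair 0).getD "", (PySem.List.pyGet? pair 1).getD ""]))
  let m := (PySem.List.enumerate order 1).foldl
      (fun (d : PySem.Dict String Int) p => d.insert p.2 p.1) PySem.Dict.empty
  (arr.map (fun pair =>
      [-(m.getD ((PySem.List.pyGet? pair 0).getD "") 0),
        m.getD ((PySem.List.pyGet? pair 1).getD "") 0]), m.items)

-- ===== PRECONDITION & SPEC =====
-- Pre_ excludes exactly the inputs with a pair of length < 2, where Python A raises IndexError.
def Pre_transform_to_cnf_1 (arr : List (List String)) : Prop := ∀ p ∈ arr, 2 ≤ p.length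
instance (arr : List (List String)) : Decidable (Pre_transform_to_cnf_1 arr) := by unfold Pre_transform_to_cnf_1; infer_instance

def pvWitness_transform_to_cnf_1 : List (List String) := [["a", "b"], ["b", "c"]]

def Spec_transform_to_cnf_1 (arr : List (List String)) (out : List (List Int) × (List (String × Int))) : Prop := out = transform_to_cnf_1_alt arr
instance (arr : List (List String)) (out : List (List Int) × (List (String × Int))) : Decidable (Spec_transform_to_cnf_1 arr out) := by unfold Spec_transform_to_cnf_1; infer_instance

-- ===== CLAIM (what is proved, stated in full; the proofs are below) =====
def Claim_equal_transform_to_cnf_1 : Prop := ∀ (arr : List (List String)), Dom_transform_to_cnf_1 arr → Pre_transform_to_cnf_1 arr → Spec_transform_to_cnf_1 arr (transform_to_cnf_1 arr)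

-- ===== LEMMAS AND PROOFS =====

-- A's per-variable map step (insert with value size+1 when unseen)
def pvMStep (d : PySem.Dict String Int) (v : String) : PySem.Dict String Int :=
  if d.contains v then d else d.insert v ((d.size : Int) + 1)

def pvMPair (d : PySem.Dict String Int) (pair : List String) : PySem.Dict String Int :=
  pvMStep (pvMStep d ((PySem.List.pyGet? pair 0).getD "")) ((PySem.List.pyGet? pair 1).getD "")

-- B's dict: variables of ks numbered 1,2,…
def pvDictOf (ks : List String) : PySem.Dict String Int :=
  (PySem.List.enumerate ks 1).foldl (fun d p => d.insert p.2 p.1) PySem.Dict.empty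

lemma pvItems_dictOf (ks : List String) (h : ks.Nodup) :
    (pvDictOf ks).items = (PySem.List.enumerate ks 1).map (fun p => (p.2, p.1)) := by
  unfold pvDictOf
  rw [PySem.Dict.items_foldl_insert_fresh (l := PySem.List.enumerate ks 1)
      (k := Prod.snd) (v := Prod.fst) (d := PySem.Dict.empty)]
  · simp [PySem.Dict.empty]
  · intro a _; simp [PySem.Dict.contains_empty]
  · rw [PySem.List.map_snd_enumerate]; exact h

lemma pvKeys_dictOf (ks : List String) (h : ks.Nodup) : (pvDictOf ks).keys = ks := by
  show (pvDictOf ks).items.map (·.1) = ks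
  rw [pvItems_dictOf ks h, List.map_map]
  exact PySem.List.map_snd_enumerate ks 1

lemma pvSize_dictOf (ks : List String) (h : ks.Nodup) : (pvDictOf ks).size = ks.length := by
  show (pvDictOf ks).items.length = ks.length
  rw [pvItems_dictOf ks h, List.length_map, PySem.List.length_enumerate]

lemma pvContains_dictOf (ks : List String) (h : ks.Nodup) (v : String) :
    (pvDictOf ks).contains v = decide (v ∈ ks) := by
  rw [PySem.Dict.contains_eq_decide_mem_keys, pvKeys_dictOf ks h]

lemma pvDictOf_append (ks : List String) (v : String) :
    pvDictOf (ks ++ [v]) = (pvDictOf ks).insert v ((ks.length : Int) + 1) := by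
  unfold pvDictOf
  rw [PySem.List.enumerate_append, List.foldl_append]
  simp [PySem.List.enumerate]
  ring_nf

-- A's step on B's dict is B's dict of the set-extended key list
lemma pvMStep_dictOf (ks : List String) (h : ks.Nodup) (v : String) :
    pvMStep (pvDictOf ks) v = pvDictOf (PySem.Set.add ks v) := by
  unfold pvMStep PySem.Set.add
  rw [pvContains_dictOf ks h, pvSize_dictOf ks h]
  simp only [PySem.Set.contains_eq_listContains]
  by_cases hv : v ∈ ks
  · simp [hv]
  · simp [hv, pvDictOf_append]

-- the whole of A's insert loop is B's dict of the deduped key list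
lemma pvFoldl_mStep (vs ks : List String) (h : ks.Nodup) :
    vs.foldl pvMStep (pvDictOf ks) = pvDictOf (vs.foldl PySem.Set.add ks) := by
  induction vs generalizing ks with
  | nil => rfl
  | cons v rest ih =>
    simp only [List.foldl_cons]
    rw [pvMStep_dictOf ks h v]
    exact ih _ (PySem.Set.nodup_add _ _ h)

lemma pvMap_eq (arr : List (List String)) :
    arr.foldl pvMPair PySem.Dict.empty
      = pvDictOf (PySem.List.dedup (arr.flatMap (fun pair =>
          [(PySem.List.pyGet? pair 0).getD "", (PySem.List.pyGet? pair 1).getD ""]))) := by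
  have hflat : ∀ (l : List (List String)) (d : PySem.Dict String Int),
      l.foldl pvMPair d
        = (l.flatMap (fun pair =>
            [(PySem.List.pyGet? pair 0).getD "", (PySem.List.pyGet? pair 1).getD ""])).foldl pvMStep d := by
    intro l
    induction l with
    | nil => intro d; rfl
    | cons p rest ih => intro d; simp [List.flatMap_cons, pvMPair, ih]
  rw [hflat, show (PySem.Dict.empty : PySem.Dict String Int) = pvDictOf [] from rfl,
      pvFoldl_mStep _ [] List.nodup_nil]
  rw [PySem.List.dedup_eq_ofList, PySem.Set.ofList_eq_foldl]

-- lookups in the final map agree with lookups in any intermediate map of A's loop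
lemma get?_pvMStep (d : PySem.Dict String Int) (v k : String) (w : Int)
    (h : d.get? k = some w) : (pvMStep d v).get? k = some w := by
  unfold pvMStep
  split_ifs with hc
  · exact h
  · have hk : d.contains k = true := by
      rw [PySem.Dict.contains_eq_isSome_get?, h]; rfl
    have hne : k ≠ v := by rintro rfl; rw [hk] at hc; exact hc rfl
    rw [PySem.Dict.get?_insert]; simp [hne, h]

lemma get?_foldl_pvMPair (l : List (List String)) (d : PySem.Dict String Int) (k : String) (w : Int)
    (h : d.get? k = some w) : (l.foldl pvMPair d).get? k = some w := by
  induction l generalizing d with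
  | nil => exact h
  | cons p rest ih =>
    exact ih _ (get?_pvMStep _ _ _ _ (get?_pvMStep _ _ _ _ h))

lemma contains_pvMStep_self (d : PySem.Dict String Int) (v : String) :
    (pvMStep d v).contains v = true := by
  unfold pvMStep
  split_ifs with hc
  · exact hc
  · exact PySem.Dict.contains_insert_self _ _ _

lemma contains_pvMStep_of (d : PySem.Dict String Int) (v k : String)
    (h : d.contains k = true) : (pvMStep d v).contains k = true := by
  unfold pvMStep
  split_ifs with hc
  · exact h
  · rw [PySem.Dict.contains_insert]; simp [h]

lemma size_pvMStep (d : PySem.Dict String Int) (v : String) :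
    ((pvMStep d v).size : Int) = if d.contains v then (d.size : Int) else (d.size : Int) + 1 := by
  unfold pvMStep
  split_ifs with hc
  · rfl
  · rw [PySem.Dict.size_insert]; simp [hc]

lemma getD_foldl_pvMPair (l : List (List String)) (d : PySem.Dict String Int) (k : String)
    (h : d.contains k = true) :
    (l.foldl pvMPair d).getD k 0 = d.getD k 0 := by
  rw [PySem.Dict.contains_eq_isSome_get?] at h
  obtain ⟨w, hw⟩ := Option.isSome_iff_exists.mp h
  rw [PySem.Dict.getD_eq_get?_getD, PySem.Dict.getD_eq_get?_getD, hw,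
      get?_foldl_pvMPair l d k w hw]

lemma contains_pvMPair_fst (d : PySem.Dict String Int) (pair : List String) :
    (pvMPair d pair).contains ((PySem.List.pyGet? pair 0).getD "") = true :=
  contains_pvMStep_of _ _ _ (contains_pvMStep_self d _)

lemma contains_pvMPair_snd (d : PySem.Dict String Int) (pair : List String) :
    (pvMPair d pair).contains ((PySem.List.pyGet? pair 1).getD "") = true :=
  contains_pvMStep_self _ _

-- main invariant: A's fold, started with counter = size + 1, builds the map by pvMPair
-- and the clause list from lookups in the FINAL map
lemma pvMain (l : List (List String)) (d : PySem.Dict String Int) (cnf : List (List Int)) :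
    l.foldl (fun (st : PySem.Dict String Int × List (List Int) × Int) pair =>
      let p0 := (PySem.List.pyGet? pair 0).getD ""
      let p1 := (PySem.List.pyGet? pair 1).getD ""
      let d1 := if st.1.contains p0 then st.1 else st.1.insert p0 st.2.2
      let c1 := if st.1.contains p0 then st.2.2 else st.2.2 + 1
      let d2 := if d1.contains p1 then d1 else d1.insert p1 c1
      let c2 := if d1.contains p1 then c1 else c1 + 1
      (d2, st.2.1 ++ [[-(d2.getD p0 0), d2.getD p1 0]], c2)) (d, cnf, (d.size : Int) + 1)
    = (l.foldl pvMPair d,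
       cnf ++ l.map (fun pair =>
         [-((l.foldl pvMPair d).getD ((PySem.List.pyGet? pair 0).getD "") 0),
           (l.foldl pvMPair d).getD ((PySem.List.pyGet? pair 1).getD "") 0]),
       ((l.foldl pvMPair d).size : Int) + 1) := by
  induction l generalizing d cnf with
  | nil => simp
  | cons pair rest ih =>
    simp only [List.foldl_cons]
    have ec1 : (if d.contains ((PySem.List.pyGet? pair 0).getD "") = true
          then ((d.size : Int) + 1) else ((d.size : Int) + 1) + 1)
        = ((pvMStep d ((PySem.List.pyGet? pair 0).getD "")).size : Int) + 1 := by
      rw [size_pvMStep]; split_ifs <;> ring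
    have e1 : (if d.contains ((PySem.List.pyGet? pair 0).getD "") = true
          then d else d.insert ((PySem.List.pyGet? pair 0).getD "") ((d.size : Int) + 1))
        = pvMStep d ((PySem.List.pyGet? pair 0).getD "") := rfl
    have ec2 : (if (pvMStep d ((PySem.List.pyGet? pair 0).getD "")).contains
            ((PySem.List.pyGet? pair 1).getD "") = true
          then (((pvMStep d ((PySem.List.pyGet? pair 0).getD "")).size : Int) + 1)
          else (((pvMStep d ((PySem.List.pyGet? pair 0).getD "")).size : Int) + 1) + 1)
        = ((pvMPair d pair).size : Int) + 1 := by
      show _ = ((pvMStep (pvMStep d ((PySem.List.pyGet? pair 0).getD ""))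
        ((PySem.List.pyGet? pair 1).getD "")).size : Int) + 1
      rw [size_pvMStep (pvMStep d ((PySem.List.pyGet? pair 0).getD ""))
            ((PySem.List.pyGet? pair 1).getD ""),
          size_pvMStep d ((PySem.List.pyGet? pair 0).getD "")]
      split_ifs <;> ring
    have e2 : (if (pvMStep d ((PySem.List.pyGet? pair 0).getD "")).contains
            ((PySem.List.pyGet? pair 1).getD "") = true
          then pvMStep d ((PySem.List.pyGet? pair 0).getD "")
          else (pvMStep d ((PySem.List.pyGet? pair 0).getD "")).insert
            ((PySem.List.pyGet? pair 1).getD "")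
            (((pvMStep d ((PySem.List.pyGet? pair 0).getD "")).size : Int) + 1))
        = pvMPair d pair := rfl
    simp only [ec1, e1, ec2, e2]
    rw [ih (pvMPair d pair)]
    refine Prod.ext rfl (Prod.ext ?_ rfl)
    simp only [List.map_cons]
    have hm0 : (rest.foldl pvMPair (pvMPair d pair)).getD ((PySem.List.pyGet? pair 0).getD "") 0
        = (pvMPair d pair).getD ((PySem.List.pyGet? pair 0).getD "") 0 :=
      getD_foldl_pvMPair _ _ _ (contains_pvMPair_fst d pair)
    have hm1 : (rest.foldl pvMPair (pvMPair d pair)).getD ((PySem.List.pyGet? pair 1).getD "") 0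
        = (pvMPair d pair).getD ((PySem.List.pyGet? pair 1).getD "") 0 :=
      getD_foldl_pvMPair _ _ _ (contains_pvMPair_snd d pair)
    rw [hm0, hm1, List.append_assoc]
    rfl

-- ===== VERDICT (by name: the statement is the Claim_ definition above) =====
theorem transform_to_cnf_1_spec : Claim_equal_transform_to_cnf_1 := by
  intro arr _ _
  show transform_to_cnf_1 arr = transform_to_cnf_1_alt arr
  unfold transform_to_cnf_1 transform_to_cnf_1_alt
  have h := pvMain arr PySem.Dict.empty []
  simp only [PySem.Dict.size_empty, Nat.cast_zero, zero_add, List.nil_append] at h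
  rw [h, pvMap_eq arr]
  rfl
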